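-- pv_equiv track=rewrite | github.com/divyeswarreddydesai/smartNIC | framework/vm_helpers/linux_os.py | parse_stdout_to_dict
-- ===== SOURCE A (Python) =====
-- def parse_stdout_to_dict(stdout):
--   """
--   Parse the stdout string into a dictionary.
--   """
--   entries = []
--   current_entry = {}
--
--   for line in stdout.splitlines():
--       line = line.strip()
--       if not line:
--           if current_entry:
--               entries.append(current_entry)
--               current_entry = {}
--           continue
--
--       if ':' in line:
--           key, value = line.split(':', 1)
--           key = key.strip()
--           value = value.strip()
--           current_entry[key] = value
--
--   if current_entry:
--       entries.append(current_entry)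
--
--   return entries
-- ===== SOURCE B (Python) =====
-- def _parse_block(lines):
--     entry = {}
--     for line in lines:
--         s = line.strip()
--         if ':' in s:
--             k, v = s.split(':', 1)
--             entry[k.strip()] = v.strip()
--     return entry
--
--
-- def parse_stdout_to_dict(stdout):
--     # group lines into maximal runs of non-blank lines, then map each block to a dict
--     blocks = []
--     cur = []
--     for line in stdout.splitlines():
--         if line.strip():
--             cur.append(line)
--         elif cur:
--             blocks.append(cur)
--             cur = []
--     if cur:
--         blocks.append(cur)
--     return [d for d in map(_parse_block, blocks) if d]
-- ===== Notes on version B (the rewrite author's own statement) =====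
-- stated objective: alternative
-- what changed: Replaces A's single-pass accumulator-with-flush over lines with a two-stage group-then-map structure: first split the lines into maximal runs of non-blank lines (blocks), then map each block through a small dict-building helper and keep only the non-empty dicts.
import Mathlib
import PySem

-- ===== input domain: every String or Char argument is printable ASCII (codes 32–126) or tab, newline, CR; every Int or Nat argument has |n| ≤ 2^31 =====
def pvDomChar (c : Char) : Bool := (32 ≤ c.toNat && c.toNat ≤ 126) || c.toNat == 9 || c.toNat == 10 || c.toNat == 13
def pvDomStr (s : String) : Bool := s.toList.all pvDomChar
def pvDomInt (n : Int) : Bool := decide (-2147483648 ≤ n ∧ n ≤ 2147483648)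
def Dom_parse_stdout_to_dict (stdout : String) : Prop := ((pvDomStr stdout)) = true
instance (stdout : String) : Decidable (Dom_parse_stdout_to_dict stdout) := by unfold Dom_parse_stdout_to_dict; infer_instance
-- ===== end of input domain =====

-- B replaces A's single-pass accumulator-with-flush by a two-stage group-then-map decomposition (same cost).

-- ===== PORT A =====
-- loop body of A: state = (entries so far, current entry)
def pvAStep (st : List (PySem.Dict String String) × PySem.Dict String String) (line : String) :
    List (PySem.Dict String String) × PySem.Dict String String :=
  let l := PySem.Str.strip line
  if l = "" then
    if st.2.items ≠ [] then (st.1 ++ [st.2], PySem.Dict.empty) else st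
  else
    (st.1,
     if PySem.Str.isIn ":" l then
       match PySem.Str.splitMax? l ":" 1 with
       | some (k :: v :: _) => st.2.insert (PySem.Str.strip k) (PySem.Str.strip v)
       | _ => st.2   -- unreachable: ':' ∈ l guarantees two pieces
     else st.2)

def parse_stdout_to_dict (stdout : String) : List (List (String × String)) :=
  let st := (PySem.Str.splitlines stdout).foldl pvAStep ([], PySem.Dict.empty)
  let entries := if st.2.items ≠ [] then st.1 ++ [st.2] else st.1
  entries.map PySem.Dict.items

-- ===== PORT B =====
-- helper _parse_block: build a dict from one block of lines
def pvParseBlock (lines : List String) : PySem.Dict String String :=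
  lines.foldl (fun d line =>
    let s := PySem.Str.strip line
    if PySem.Str.isIn ":" s then
      match PySem.Str.splitMax? s ":" 1 with
      | some (k :: v :: _) => d.insert (PySem.Str.strip k) (PySem.Str.strip v)
      | _ => d
    else d) PySem.Dict.empty

-- stage 1 loop body: group lines into maximal runs of non-blank lines
def pvBStep (st : List (List String) × List String) (line : String) :
    List (List String) × List String :=
  if PySem.Str.strip line ≠ "" then (st.1, st.2 ++ [line])
  else if st.2 ≠ [] then (st.1 ++ [st.2], []) else st

def pvBlocks (lines : List String) : List (List String) :=
  let st := lines.foldl pvBStep ([], [])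
  if st.2 ≠ [] then st.1 ++ [st.2] else st.1

def parse_stdout_to_dict_alt (stdout : String) : List (List (String × String)) :=
  ((((pvBlocks (PySem.Str.splitlines stdout)).map pvParseBlock).filter
      (fun d => d.items ≠ [])).map PySem.Dict.items)

-- ===== PRECONDITION & SPEC =====
def Spec_parse_stdout_to_dict (stdout : String) (out : List (List (String × String))) : Prop := out = parse_stdout_to_dict_alt stdout
instance (stdout : String) (out : List (List (String × String))) : Decidable (Spec_parse_stdout_to_dict stdout out) := by unfold Spec_parse_stdout_to_dict; infer_instance

-- ===== CLAIM (what is proved, stated in full; the proofs are below) =====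
def Claim_equal_parse_stdout_to_dict : Prop := ∀ (stdout : String), Dom_parse_stdout_to_dict stdout → Spec_parse_stdout_to_dict stdout (parse_stdout_to_dict stdout)

-- ===== LEMMAS AND PROOFS =====

-- the dicts B keeps after map-then-filter
def pvFilt (bs : List (List String)) : List (PySem.Dict String String) :=
  (bs.map pvParseBlock).filter (fun d => d.items ≠ [])

lemma pvParseBlock_append (ls : List String) (l : String) :
    pvParseBlock (ls ++ [l]) =
      (fun d line =>
        let s := PySem.Str.strip line
        if PySem.Str.isIn ":" s then
          match PySem.Str.splitMax? s ":" 1 with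
          | some (k :: v :: _) => PySem.Dict.insert d (PySem.Str.strip k) (PySem.Str.strip v)
          | _ => d
        else d) (pvParseBlock ls) l := by
  simp [pvParseBlock, List.foldl_append]

lemma pvInvariant (lines : List String) (e : List (PySem.Dict String String))
    (c : PySem.Dict String String) (bs : List (List String)) (cl : List String)
    (he : e = pvFilt bs) (hc : c = pvParseBlock cl) :
    (lines.foldl pvAStep (e, c)).1 = pvFilt (lines.foldl pvBStep (bs, cl)).1 ∧
    (lines.foldl pvAStep (e, c)).2 = pvParseBlock (lines.foldl pvBStep (bs, cl)).2 := by
  induction lines generalizing e c bs cl with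
  | nil => exact ⟨he, hc⟩
  | cons l t ih =>
    simp only [List.foldl_cons, pvAStep, pvBStep]
    by_cases hb : PySem.Str.strip l = ""
    · rw [hb]
      simp only [ne_eq, not_true_eq_false, if_false]
      by_cases hcl : cl = []
      · have hce : c.items = [] := by rw [hc, hcl]; rfl
        simp only [hcl, hce, not_true_eq_false, if_false]
        exact ih e c bs [] he (hcl ▸ hc)
      · by_cases hne : c.items = []
        · have hc0 : c = pvParseBlock [] := by apply PySem.Dict.ext; rw [hne]; rfl
          simp only [hne, hcl, not_true_eq_false, not_false_eq_true, if_false, if_true]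
          apply ih _ _ _ _ _ hc0
          rw [he]; simp [pvFilt, List.filter_append, ← hc, hne]
        · simp only [hne, hcl, not_false_eq_true, if_true]
          refine ih (e ++ [c]) PySem.Dict.empty (bs ++ [cl]) [] ?_ ?_
          · rw [he]; simp [pvFilt, List.filter_append, ← hc, hne]
          · simp [pvParseBlock]
    · simp only [ne_eq, hb, not_false_eq_true, if_false, if_true]
      refine ih e _ bs (cl ++ [l]) he ?_
      rw [pvParseBlock_append, ← hc]

-- ===== VERDICT (by name: the statement is the Claim_ definition above) =====
theorem parse_stdout_to_dict_spec : Claim_equal_parse_stdout_to_dict := by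
  intro stdout _
  unfold Spec_parse_stdout_to_dict parse_stdout_to_dict parse_stdout_to_dict_alt pvBlocks
  obtain ⟨h1, h2⟩ := pvInvariant (PySem.Str.splitlines stdout) [] PySem.Dict.empty [] []
    (by simp [pvFilt]) (by simp [pvParseBlock])
  set st := (PySem.Str.splitlines stdout).foldl pvAStep ([], PySem.Dict.empty)
  set st' := (PySem.Str.splitlines stdout).foldl pvBStep ([], [])
  by_cases hcl : st'.2 = []
  · have : st.2.items = [] := by rw [h2, hcl]; rfl
    simp [this, hcl, h1, pvFilt]
  · by_cases hne : st.2.items = []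
    · simp only [hne, ne_eq, not_true_eq_false, hcl, if_neg, not_false_eq_true, if_true]
      rw [h1]
      simp [pvFilt, ← h2, hne]
    · simp only [ne_eq, hne, not_false_eq_true, if_true, hcl]
      rw [h1, h2]
      simp [pvFilt, ← h2, hne]
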